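-- pv_equiv track=rewrite | github.com/holo-q/cc-lsp-now | src/hsp/render_memory.py | _index_to_alpha
-- ===== SOURCE A (Python) =====
-- def _index_to_alpha(n: int) -> str:
--     """Map a 0-based index to a base-26 alpha label.
--
--     ``0 -> A, 1 -> B, ..., 25 -> Z, 26 -> AA, 27 -> AB, ...``. Used to mint
--     symbol bucket prefixes deterministically.
--     """
--     s = ""
--     m = n
--     while True:
--         s = chr(ord("A") + m % 26) + s
--         m //= 26
--         if m == 0:
--             break
--         m -= 1
--     return s
-- ===== SOURCE B (Python) =====
-- def _index_to_alpha(n: int) -> str: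
--     """Map a 0-based index to a base-26 alpha label, most-significant digit first."""
--     if n < 26:
--         return chr(ord("A") + n)
--     return _index_to_alpha(n // 26 - 1) + chr(ord("A") + n % 26)
-- ===== Notes on version B (the rewrite author's own statement) =====
-- stated objective: simpler
-- what changed: Replaced the explicit while-loop with string prepending by direct recursion on the digit structure that builds the label most-significant-digit-first via the call stack.
-- outside the precondition, e.g. on _index_to_alpha(-1): A does not finish within the time limit, B returns '@'
import Mathlib
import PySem

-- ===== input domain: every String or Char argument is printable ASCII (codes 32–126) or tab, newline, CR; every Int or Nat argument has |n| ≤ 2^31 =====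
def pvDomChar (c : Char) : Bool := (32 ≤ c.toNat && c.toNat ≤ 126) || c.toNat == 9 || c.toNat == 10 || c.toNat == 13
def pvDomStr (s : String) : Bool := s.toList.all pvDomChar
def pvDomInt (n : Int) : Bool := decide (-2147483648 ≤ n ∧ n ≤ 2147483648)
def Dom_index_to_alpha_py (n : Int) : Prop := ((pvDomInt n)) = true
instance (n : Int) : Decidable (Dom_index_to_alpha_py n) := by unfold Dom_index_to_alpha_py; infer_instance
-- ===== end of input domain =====

-- B rebuilds the label by recursion on the digit structure (most-significant digit first via
-- the call stack) instead of A's while-loop with string prepending; objective: simpler.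

-- ===== PORT A =====
-- A's while-loop; `fuel` only makes the recursion total (for n ≥ 0, fuel n.toNat+1 is enough).
def indexToAlphaLoop : Nat → Int → String → String
  | 0, _, s => s
  | fuel + 1, m, s =>
    let s' := String.ofList [Char.ofNat (65 + (PySem.Int.mod m 26).toNat)] ++ s
    let m' := PySem.Int.floordiv m 26
    if m' = 0 then s' else indexToAlphaLoop fuel (m' - 1) s'

def index_to_alpha_py (n : Int) : String := indexToAlphaLoop (n.toNat + 1) n ""

-- ===== PORT B =====
def index_to_alpha_py_alt (n : Int) : String :=
  if _h : n < 26 then String.ofList [Char.ofNat ((65 + n).toNat)]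
  else index_to_alpha_py_alt (PySem.Int.floordiv n 26 - 1) ++
       String.ofList [Char.ofNat ((65 + PySem.Int.mod n 26).toNat)]
termination_by n.toNat
decreasing_by
  have h26 : PySem.Int.floordiv n 26 = n / 26 :=
    PySem.Int.floordiv_eq_ediv_of_pos (by omega)
  simp only [h26]; omega

-- ===== PRECONDITION & SPEC =====
-- Pre_ excludes negative n, on which A never terminates (the Python loop diverges).
def Pre_index_to_alpha_py (n : Int) : Prop := 0 ≤ n
instance (n : Int) : Decidable (Pre_index_to_alpha_py n) := by unfold Pre_index_to_alpha_py; infer_instance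
def pvWitness_index_to_alpha_py : Int := (27)

def Spec_index_to_alpha_py (n : Int) (out : String) : Prop := out = index_to_alpha_py_alt n
instance (n : Int) (out : String) : Decidable (Spec_index_to_alpha_py n out) := by unfold Spec_index_to_alpha_py; infer_instance

-- ===== CLAIM (what is proved, stated in full; the proofs are below) =====
def Claim_equal_index_to_alpha_py : Prop := ∀ (n : Int), Dom_index_to_alpha_py n → Pre_index_to_alpha_py n → Spec_index_to_alpha_py n (index_to_alpha_py n)

-- ===== LEMMAS AND PROOFS =====

-- The loop with enough fuel computes B's value appended to the accumulator.
theorem indexToAlphaLoop_eq (k : Nat) :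
    ∀ (m : Int) (s : String), 0 ≤ m → m < (k : Int) →
      indexToAlphaLoop k m s = index_to_alpha_py_alt m ++ s := by
  induction k with
  | zero => intro m s h0 hk; omega
  | succ k ih =>
    intro m s h0 hk
    have hdiv : PySem.Int.floordiv m 26 = m / 26 :=
      PySem.Int.floordiv_eq_ediv_of_pos (by omega)
    have hmod : PySem.Int.mod m 26 = m % 26 :=
      PySem.Int.mod_eq_emod_of_pos (by omega)
    by_cases hlt : m < 26
    · have hq : PySem.Int.floordiv m 26 = 0 := by rw [hdiv]; omega
      have e2 : 65 + (PySem.Int.mod m 26).toNat = (65 + m).toNat := by rw [hmod]; omega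
      simp only [indexToAlphaLoop, e2, hq, if_pos]
      rw [index_to_alpha_py_alt]
      simp only [dif_pos hlt]
    · have hne : ¬ PySem.Int.floordiv m 26 = 0 := by rw [hdiv]; omega
      have e1 : 65 + (PySem.Int.mod m 26).toNat = (65 + PySem.Int.mod m 26).toNat := by
        rw [hmod]; omega
      simp only [indexToAlphaLoop, e1, if_neg hne]
      rw [ih (PySem.Int.floordiv m 26 - 1) _ (by rw [hdiv]; omega) (by rw [hdiv]; omega)]
      conv_rhs => rw [index_to_alpha_py_alt]
      simp only [dif_neg hlt]
      rw [String.append_assoc]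

theorem index_to_alpha_py_spec : Claim_equal_index_to_alpha_py := by
  intro n _ hpre
  unfold Spec_index_to_alpha_py index_to_alpha_py
  rw [indexToAlphaLoop_eq (n.toNat + 1) n "" hpre (by omega)]
  simp
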